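-- pv_equiv track=rewrite | github.com/passi3/leetcode | 3718-smallest-missing-multiple-of-k/3718-smallest-missing-multiple-of-k.py | missingMultiple
-- ===== SOURCE A (Python) =====
-- from typing import List
--
-- def missingMultiple(nums: List[int], k: int) -> int:
--     kInNums = False
--     i = 1
--     while True:
--         if k*i in nums:
--             i += 1
--         else:
--             return k*i
-- ===== SOURCE B (Python) =====
-- from typing import List
--
-- def missingMultiple(nums: List[int], k: int) -> int:
--     if k == 0:
--         return 0
--     qs = sorted({x // k for x in nums if x % k == 0 and x // k >= 1})
--     expected = 1
--     for q in qs: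
--         if q > expected:
--             break
--         if q == expected:
--             expected += 1
--     return k * expected
-- ===== Notes on version B (the rewrite author's own statement) =====
-- stated objective: alternative
-- what changed: Instead of probing k*1, k*2, ... with a membership scan of nums for each candidate, B filters nums once to its multiples of k, sorts the de-duplicated quotients, and finds the first gap in one pass over that sorted index; k=0 (where no division is possible) returns 0 directly, and Pre_ excludes k=0 with 0 in nums, where A loops forever.
-- outside the precondition, e.g. on missingMultiple([0], 0): A does not finish within the time limit, B returns 0
import Mathlib
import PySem

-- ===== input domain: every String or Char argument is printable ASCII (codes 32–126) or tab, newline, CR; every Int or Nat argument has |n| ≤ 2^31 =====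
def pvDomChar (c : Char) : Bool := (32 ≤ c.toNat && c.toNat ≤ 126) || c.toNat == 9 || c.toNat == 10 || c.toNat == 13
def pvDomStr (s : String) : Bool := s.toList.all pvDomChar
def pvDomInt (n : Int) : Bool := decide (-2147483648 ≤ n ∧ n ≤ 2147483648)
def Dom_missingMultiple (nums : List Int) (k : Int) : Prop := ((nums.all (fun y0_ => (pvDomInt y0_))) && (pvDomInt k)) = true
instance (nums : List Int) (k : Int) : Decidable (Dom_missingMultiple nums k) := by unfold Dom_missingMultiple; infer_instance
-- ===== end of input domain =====

-- B replaces A's probe-each-candidate loop (a membership scan of nums per candidate) by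
-- build-an-index-then-one-scan: filter nums to multiples of k, sort the de-duplicated quotients,
-- and find the first gap in a single pass (objective: alternative algorithm, similar cost).

-- ===== PORT A =====
-- A's 'while True' loop, i = 1, 2, …; fuel nums.length+1 only makes the recursion total:
-- for k ≠ 0 some candidate among the first nums.length+1 is absent from nums (proved below),
-- and for k = 0 Pre_ guarantees the very first check already returns.
def goA (nums : List Int) (k : Int) : Nat → Int → Int
  | 0, _ => 0
  | fuel+1, i => if k*i ∈ nums then goA nums k fuel (i+1) else k*i

def missingMultiple (nums : List Int) (k : Int) : Int :=
  goA nums k (nums.length + 1) 1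

-- ===== PORT B =====
-- the 'for q in qs: if q > expected: break; if q == expected: expected += 1' loop of Source B
def walkB : List Int → Int → Int
  | [], e => e
  | q :: rest, e => if e < q then e else if q = e then walkB rest (e+1) else walkB rest e

def missingMultiple_alt (nums : List Int) (k : Int) : Int :=
  if k = 0 then 0
  else
    let qs := PySem.List.sorted
      (PySem.Set.ofList ((nums.filter
          (fun x => decide (PySem.Int.mod x k = 0 ∧ 1 ≤ PySem.Int.floordiv x k))).map
        (fun x => PySem.Int.floordiv x k)))
      (fun x => x) false
    k * walkB qs 1

-- ===== PRECONDITION & SPEC =====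
-- Pre_ excludes exactly the inputs where A loops forever: k = 0 with 0 ∈ nums (0·i is always in nums).
def Pre_missingMultiple (nums : List Int) (k : Int) : Prop := k ≠ 0 ∨ (0:Int) ∉ nums
instance (nums : List Int) (k : Int) : Decidable (Pre_missingMultiple nums k) := by
  unfold Pre_missingMultiple; infer_instance
def pvWitness_missingMultiple : List Int × Int := ([2, 4, 5], 2)

def Spec_missingMultiple (nums : List Int) (k : Int) (out : Int) : Prop := out = missingMultiple_alt nums k
instance (nums : List Int) (k : Int) (out : Int) : Decidable (Spec_missingMultiple nums k out) := by unfold Spec_missingMultiple; infer_instance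

-- ===== CLAIM (what is proved, stated in full; the proofs are below) =====
def Claim_equal_missingMultiple : Prop := ∀ (nums : List Int) (k : Int), Dom_missingMultiple nums k → Pre_missingMultiple nums k → Spec_missingMultiple nums k (missingMultiple nums k)

-- ===== LEMMAS AND PROOFS =====

-- exact division: x // k recovers c from x = k * c
theorem floordiv_mul_self (k c : Int) (hk : k ≠ 0) : PySem.Int.floordiv (k * c) k = c := by
  have hdvd : k ∣ k * c := Dvd.intro c rfl
  have hmod : PySem.Int.mod (k * c) k = 0 := (PySem.Int.mod_eq_zero_iff_dvd _ _).2 hdvd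
  have h := PySem.Int.floordiv_mul_add_mod (k * c) k
  rw [hmod, add_zero] at h
  have : PySem.Int.floordiv (k * c) k * k = c * k := by rw [h]; ring
  exact mul_right_cancel₀ hk this

-- membership in B's sorted quotient index
theorem mem_qs (nums : List Int) (k : Int) (hk : k ≠ 0) (i : Int) :
    i ∈ PySem.List.sorted
      (PySem.Set.ofList ((nums.filter
          (fun x => decide (PySem.Int.mod x k = 0 ∧ 1 ≤ PySem.Int.floordiv x k))).map
        (fun x => PySem.Int.floordiv x k)))
      (fun x => x) false ↔ (1 ≤ i ∧ k * i ∈ nums) := by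
  rw [PySem.List.mem_sorted, PySem.Set.mem_ofList, List.mem_map]
  constructor
  · rintro ⟨x, hx, rfl⟩
    rw [List.mem_filter] at hx
    obtain ⟨hxm, hcond⟩ := hx
    simp only [decide_eq_true_eq] at hcond
    obtain ⟨hmod, hge⟩ := hcond
    have hdvd : k ∣ x := (PySem.Int.mod_eq_zero_iff_dvd _ _).1 hmod
    obtain ⟨c, rfl⟩ := hdvd
    rw [floordiv_mul_self k c hk] at *
    exact ⟨hge, hxm⟩
  · rintro ⟨h1, hmem⟩
    refine ⟨k * i, ?_, floordiv_mul_self k i hk⟩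
    rw [List.mem_filter]
    refine ⟨hmem, ?_⟩
    simp only [decide_eq_true_eq]
    refine ⟨(PySem.Int.mod_eq_zero_iff_dvd _ _).2 (Dvd.intro i rfl), ?_⟩
    rw [floordiv_mul_self k i hk]; exact h1

-- B's single pass returns the least value ≥ e missing from a strictly increasing list
theorem walkB_spec : ∀ (qs : List Int), qs.Pairwise (· < ·) →
    ∀ e : Int, (∀ q ∈ qs, e ≤ q) →
    e ≤ walkB qs e ∧ walkB qs e ∉ qs ∧ ∀ j, e ≤ j → j < walkB qs e → j ∈ qs := by
  intro qs
  induction qs with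
  | nil => intro _ e _; refine ⟨le_refl e, by simp [walkB], ?_⟩; intro j hj1 hj2; simp [walkB] at hj2; omega
  | cons q rest ih =>
    intro hpw e hle
    have hq : e ≤ q := hle q (List.mem_cons_self ..)
    rw [List.pairwise_cons] at hpw
    by_cases hlt : e < q
    · simp only [walkB, if_pos hlt]
      refine ⟨le_refl e, ?_, by omega⟩
      intro hmem
      rcases List.mem_cons.1 hmem with h | h
      · omega
      · exact absurd (hpw.1 e h) (by omega)
    · have heq : q = e := by omega
      simp only [walkB, if_neg hlt, if_pos heq]
      have hrest : ∀ r ∈ rest, e + 1 ≤ r := by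
        intro r hr; have := hpw.1 r hr; omega
      obtain ⟨h1, h2, h3⟩ := ih hpw.2 (e+1) hrest
      refine ⟨by omega, ?_, ?_⟩
      · intro hmem
        rcases List.mem_cons.1 hmem with h | h
        · omega
        · exact h2 h
      · intro j hj1 hj2
        by_cases hje : j = e
        · rw [List.mem_cons]; left; omega
        · exact List.mem_cons.2 (Or.inr (h3 j (by omega) hj2))

-- pigeonhole: for k ≠ 0 some candidate k·m, i ≤ m < i + |nums| + 1, is missing from nums
theorem exists_missing (nums : List Int) (k : Int) (hk : k ≠ 0) (i : Int) :
    ∃ m, i ≤ m ∧ m < i + (nums.length + 1 : Nat) ∧ k * m ∉ nums := by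
  by_contra hall
  push Not at hall
  set n := nums.length with hn
  have hsub : ∀ t ∈ List.range (n+1), k * (i + t) ∈ nums := by
    intro t ht
    rw [List.mem_range] at ht
    exact hall (i + t) (by omega) (by push_cast; omega)
  set L := (List.range (n+1)).map (fun t : Nat => k * (i + t)) with hL
  have hnodup : L.Nodup := by
    refine List.Nodup.map ?_ (List.nodup_range)
    intro a b hab
    simp only at hab
    have := mul_left_cancel₀ hk hab
    omega
  have hLsub : L ⊆ nums := by
    intro x hx
    rw [hL, List.mem_map] at hx
    obtain ⟨t, ht, rfl⟩ := hx
    exact hsub t ht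
  have := (hnodup.subperm hLsub).length_le
  rw [hL, List.length_map, List.length_range] at this
  omega

-- A's loop returns k·m for the least m ≥ i with k·m ∉ nums, given enough fuel
theorem goA_spec (nums : List Int) (k : Int) :
    ∀ (fuel : Nat) (i : Int), (∃ m, i ≤ m ∧ m < i + fuel ∧ k * m ∉ nums) →
    ∃ m, goA nums k fuel i = k * m ∧ i ≤ m ∧ k * m ∉ nums ∧
      ∀ j, i ≤ j → j < m → k * j ∈ nums := by
  intro fuel
  induction fuel with
  | zero => intro i ⟨m, h1, h2, _⟩; push_cast at h2; omega
  | succ f ih =>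
    intro i ⟨m, h1, h2, h3⟩
    by_cases hmem : k * i ∈ nums
    · simp only [goA, if_pos hmem]
      have hmi : m ≠ i := by rintro rfl; exact h3 hmem
      obtain ⟨m', hA, hm1, hm2, hm3⟩ := ih (i+1) ⟨m, by omega, by push_cast at h2 ⊢; omega, h3⟩
      refine ⟨m', hA, by omega, hm2, ?_⟩
      intro j hj1 hj2
      by_cases hji : j = i
      · rw [hji]; exact hmem
      · exact hm3 j (by omega) hj2
    · exact ⟨i, by simp [goA, hmem], le_refl i, hmem, by omega⟩

-- ===== VERDICT (by name: the statement is the Claim_ definition above) =====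
theorem missingMultiple_spec : Claim_equal_missingMultiple := by
  intro nums k _ hpre
  unfold Spec_missingMultiple missingMultiple missingMultiple_alt
  by_cases hk : k = 0
  · subst hk
    have h0 : (0:Int) ∉ nums := hpre.resolve_left (by simp)
    simp only [goA]
    rw [if_neg (by simpa using h0)]
    simp
  · rw [if_neg hk]
    set qs := PySem.List.sorted
      (PySem.Set.ofList ((nums.filter
          (fun x => decide (PySem.Int.mod x k = 0 ∧ 1 ≤ PySem.Int.floordiv x k))).map
        (fun x => PySem.Int.floordiv x k)))
      (fun x => x) false with hqs
    have hpw : qs.Pairwise (· < ·) := by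
      rw [hqs]; exact PySem.List.sorted_ofList_pairwise_lt _
    have hge : ∀ q ∈ qs, (1:Int) ≤ q := by
      intro q hq; exact ((mem_qs nums k hk q).1 (hqs ▸ hq)).1
    obtain ⟨b1, b2, b3⟩ := walkB_spec qs hpw 1 hge
    obtain ⟨mA, hA, a1, a2, a3⟩ :=
      goA_spec nums k (nums.length + 1) 1 (exists_missing nums k hk 1)
    set mB := walkB qs 1 with hmB
    have hBnot : k * mB ∉ nums := by
      intro h; exact b2 ((mem_qs nums k hk mB).2 ⟨b1, h⟩)
    have : mA = mB := by
      by_contra hne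
      rcases lt_or_gt_of_ne hne with h | h
      · exact a2 (((mem_qs nums k hk mA).1 (b3 mA a1 h)).2)
      · exact hBnot (a3 mB b1 h)
    rw [hA, this]
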